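-- pv_equiv track=rewrite | github.com/PrathameshJadhav30/Accenture-PYQ-Coding-Questions | 013-MaxExponents/MaxExponents.py | MaxExponents
-- ===== SOURCE A (Python) =====
-- def count_exponent_of_2(n):
--     count = 0
--     while n % 2 == 0:
--         count += 1
--         n //= 2
--     return count
--
-- def MaxExponents(a, b):
--     max_num = a
--     max_exp = count_exponent_of_2(a)
--
--     for i in range(a + 1, b + 1):
--         current_exp = count_exponent_of_2(i)
--         if current_exp > max_exp or (current_exp == max_exp and i < max_num):
--             max_exp = current_exp
--             max_num = i
--     return max_num
-- ===== SOURCE B (Python) =====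
-- def MaxExponents(a, b):
--     # Descend over exponents e: the first e (from the top) such that [a, b]
--     # contains a multiple of 2**e is the maximal power-of-2 exponent in the
--     # range; return the smallest such multiple.
--     limit = max(abs(a), abs(b)).bit_length()
--     for e in range(limit, -1, -1):
--         p = 1 << e
--         m = -(-a // p) * p   # smallest multiple of p that is >= a
--         if m <= b:
--             return m
--     return a                 # empty range (a > b): no multiple fits, return a
-- ===== Notes on version B (the rewrite author's own statement) =====
-- stated objective: faster
-- what changed: Instead of scanning every integer in [a,b] and counting each one's factors of two, B searches downward over exponents e for the largest e such that [a,b] contains a multiple of 2**e and returns the smallest such multiple, computed by ceiling division.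
-- outside the precondition, e.g. on MaxExponents(0, 5): A does not finish within the time limit, B returns 0; on MaxExponents(-3, 4): A does not finish within the time limit, B returns 0
import Mathlib
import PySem

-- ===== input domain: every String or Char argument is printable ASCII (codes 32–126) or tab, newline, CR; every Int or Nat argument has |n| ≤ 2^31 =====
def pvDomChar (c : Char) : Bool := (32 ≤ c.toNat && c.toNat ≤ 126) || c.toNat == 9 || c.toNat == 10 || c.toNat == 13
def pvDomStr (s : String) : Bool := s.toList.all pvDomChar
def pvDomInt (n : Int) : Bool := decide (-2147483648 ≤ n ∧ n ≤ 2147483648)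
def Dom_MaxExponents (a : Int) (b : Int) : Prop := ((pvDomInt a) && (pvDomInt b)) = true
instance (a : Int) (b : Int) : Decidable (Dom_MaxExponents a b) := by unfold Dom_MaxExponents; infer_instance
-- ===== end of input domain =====

-- ===== PORT A =====
-- B re-implements A by a descending search over exponents instead of scanning every number in [a, b]; objective: faster.
-- helper: Python's count_exponent_of_2 (while n % 2 == 0), made total with fuel (> log2 |n| whenever n ≠ 0; Python diverges at n = 0, excluded by Pre_)
def countExponentOf2Fuel : Nat → Int → Int → Int
  | 0, _, count => count
  | fuel + 1, n, count =>
    if PySem.Int.mod n 2 = 0 then countExponentOf2Fuel fuel (PySem.Int.floordiv n 2) (count + 1)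
    else count

def countExponentOf2 (n : Int) : Int := countExponentOf2Fuel (n.natAbs + 1) n 0

def MaxExponents (a : Int) (b : Int) : Int :=
  ((PySem.List.pyRange (a + 1) (b + 1) 1).foldl
    (fun st i =>
      let current_exp := countExponentOf2 i
      if current_exp > st.2 ∨ (current_exp = st.2 ∧ i < st.1) then (i, current_exp) else st)
    (a, countExponentOf2 a)).1

-- ===== PORT B =====
-- helper: the for-loop 'for e in range(limit, -1, -1)' of Source B, descending over e
def bDescend (a : Int) (b : Int) : Nat → Int
  | 0 =>
    let p : Int := (1 : Int) <<< (0 : Nat)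
    let m : Int := -(PySem.Int.floordiv (-a) p) * p
    if m ≤ b then m else a
  | e + 1 =>
    let p : Int := (1 : Int) <<< (e + 1)
    let m : Int := -(PySem.Int.floordiv (-a) p) * p
    if m ≤ b then m else bDescend a b e

def MaxExponents_alt (a : Int) (b : Int) : Int :=
  let limit := PySem.Int.bitLength (max (a.natAbs : Int) (b.natAbs : Int))
  bDescend a b limit

-- ===== PRECONDITION & SPEC =====
-- Pre_ excludes exactly the inputs whose scanned range (a itself, and a+1 .. b) contains 0:
-- there Python's count_exponent_of_2(0) loops forever, so A never returns (infinite loop, not a value).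
def Pre_MaxExponents (a : Int) (b : Int) : Prop := 0 < a ∨ (a < 0 ∧ b < 0)
instance (a : Int) (b : Int) : Decidable (Pre_MaxExponents a b) := by unfold Pre_MaxExponents; infer_instance
def pvWitness_MaxExponents : Int × Int := (3, 10)

def Spec_MaxExponents (a : Int) (b : Int) (out : Int) : Prop := out = MaxExponents_alt a b
instance (a : Int) (b : Int) (out : Int) : Decidable (Spec_MaxExponents a b out) := by unfold Spec_MaxExponents; infer_instance

-- ===== CLAIM (what is proved, stated in full; the proofs are below) =====
def Claim_equal_MaxExponents : Prop := ∀ (a : Int) (b : Int), Dom_MaxExponents a b → Pre_MaxExponents a b → Spec_MaxExponents a b (MaxExponents a b)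

-- ===== LEMMAS AND PROOFS =====

-- proof-only helper: A's loop body, named (definitionally the lambda inside MaxExponents)
def aStep : Int × Int → Int → Int × Int := fun st i =>
  let current_exp := countExponentOf2 i
  if current_exp > st.2 ∨ (current_exp = st.2 ∧ i < st.1) then (i, current_exp) else st

lemma MaxExponents_eq_fold (a b : Int) :
    MaxExponents a b = ((PySem.List.pyRange (a + 1) (b + 1) 1).foldl aStep (a, countExponentOf2 a)).1 := rfl

-- the smallest multiple of 2^e that is ≥ a (the value Source B computes as -(-a // (1 << e)) * (1 << e))
def ceilMul (a : Int) (e : Nat) : Int := -(PySem.Int.floordiv (-a) (2 ^ e)) * 2 ^ e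

lemma ceilMul_spec (a : Int) (e : Nat) :
    a ≤ ceilMul a e ∧ (2 ^ e : Int) ∣ ceilMul a e := by
  have hp : (0 : Int) < 2 ^ e := by positivity
  have h := (PySem.Int.neg_floordiv_neg_eq_iff_of_pos (a := a)
    (b := (2 ^ e : Int)) (q := -(PySem.Int.floordiv (-a) (2 ^ e))) hp).mp rfl
  exact ⟨h.2, Dvd.intro _ (mul_comm _ _)⟩

lemma ceilMul_le {a m : Int} {e : Nat} (hd : (2 ^ e : Int) ∣ m) (ham : a ≤ m) :
    ceilMul a e ≤ m := by
  have hp : (0 : Int) < 2 ^ e := by positivity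
  have h := (PySem.Int.neg_floordiv_neg_eq_iff_of_pos (a := a)
    (b := (2 ^ e : Int)) (q := -(PySem.Int.floordiv (-a) (2 ^ e))) hp).mp rfl
  obtain ⟨t, rfl⟩ := hd
  have h1 : (-(PySem.Int.floordiv (-a) (2 ^ e)) - 1) * 2 ^ e < t * 2 ^ e := by
    calc (-(PySem.Int.floordiv (-a) (2 ^ e)) - 1) * 2 ^ e < a := h.1
    _ ≤ _ := by rw [mul_comm] at ham; exact ham
  have h2 : -(PySem.Int.floordiv (-a) (2 ^ e)) ≤ t := by
    have := lt_of_mul_lt_mul_right h1 (le_of_lt hp)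
    omega
  calc ceilMul a e = -(PySem.Int.floordiv (-a) (2 ^ e)) * 2 ^ e := rfl
  _ ≤ t * 2 ^ e := mul_le_mul_of_nonneg_right h2 (le_of_lt hp)
  _ = 2 ^ e * t := mul_comm _ _

-- countExponentOf2 computes the 2-adic valuation of |n| (n ≠ 0)
lemma countExponentOf2Fuel_eq (fuel : Nat) :
    ∀ (n c : Int), n ≠ 0 → n.natAbs < fuel →
      countExponentOf2Fuel fuel n c = c + (padicValNat 2 n.natAbs : Int) := by
  induction fuel with
  | zero => intro n c hn h; omega
  | succ f ih =>
    intro n c hn h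
    by_cases hd : PySem.Int.mod n 2 = 0
    · have hdvd : (2 : Int) ∣ n := (PySem.Int.mod_eq_zero_iff_dvd n 2).mp hd
      obtain ⟨k, rfl⟩ := hdvd
      have hk : k ≠ 0 := by rintro rfl; simp at hn
      have hfd : PySem.Int.floordiv (2 * k) 2 = k := by
        rw [PySem.Int.floordiv_eq_ediv_of_pos (by norm_num)]
        omega
      have hna : (2 * k).natAbs = 2 * k.natAbs := by
        simp [Int.natAbs_mul]
      have hv : padicValNat 2 (2 * k).natAbs = padicValNat 2 k.natAbs + 1 := by
        rw [hna]
        haveI : Fact (Nat.Prime 2) := ⟨Nat.prime_two⟩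
        have hdp := padicValNat.div (p := 2) (b := 2 * k.natAbs) ⟨k.natAbs, rfl⟩
        have hge : 1 ≤ padicValNat 2 (2 * k.natAbs) := by
          have := (padicValNat_dvd_iff (p := 2) 1 (2 * k.natAbs)).mp (by simp)
          rcases this with h0 | h1
          · exfalso; have : k.natAbs ≠ 0 := Int.natAbs_ne_zero.mpr hk; omega
          · exact h1
        have hdivk : 2 * k.natAbs / 2 = k.natAbs := by omega
        rw [hdivk] at hdp
        omega
      simp only [countExponentOf2Fuel, hd, if_pos, hfd]
      rw [ih k (c + 1) hk (by have : k.natAbs ≠ 0 := Int.natAbs_ne_zero.mpr hk; omega)]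
      rw [hv]
      push_cast
      ring
    · have hnd : ¬ (2 : Int) ∣ n := fun hdvd => hd ((PySem.Int.mod_eq_zero_iff_dvd n 2).mpr hdvd)
      have hndn : ¬ (2 : Nat) ∣ n.natAbs := by
        intro hh
        exact hnd (Int.natAbs_dvd_natAbs.mp (by simpa using hh))
      simp only [countExponentOf2Fuel, hd, padicValNat.eq_zero_of_not_dvd hndn]
      simp

lemma countExponentOf2_eq {n : Int} (hn : n ≠ 0) :
    countExponentOf2 n = (padicValNat 2 n.natAbs : Int) := by
  have := countExponentOf2Fuel_eq (n.natAbs + 1) n 0 hn (by omega)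
  simpa [countExponentOf2] using this

lemma countExponentOf2_dvd {n : Int} (hn : n ≠ 0) (e : Nat) :
    ((e : Int) ≤ countExponentOf2 n) ↔ (2 ^ e : Int) ∣ n := by
  haveI : Fact (Nat.Prime 2) := ⟨Nat.prime_two⟩
  rw [countExponentOf2_eq hn]
  have hna : n.natAbs ≠ 0 := Int.natAbs_ne_zero.mpr hn
  constructor
  · intro h
    have he : e ≤ padicValNat 2 n.natAbs := by exact_mod_cast h
    have h1 : (2 : Nat) ^ e ∣ n.natAbs := (padicValNat_dvd_iff e n.natAbs).mpr (Or.inr he)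
    have h2 : ((2 ^ e : Int)).natAbs ∣ n.natAbs := by simpa using h1
    exact Int.natAbs_dvd_natAbs.mp h2
  · intro h
    have h1 : (2 : Nat) ^ e ∣ n.natAbs := by
      have := Int.natAbs_dvd_natAbs.mpr h
      simpa using this
    rcases (padicValNat_dvd_iff e n.natAbs).mp h1 with h0 | h2
    · exact absurd h0 hna
    · exact_mod_cast h2

-- A's fold over a strictly increasing list returns the first element attaining the maximal exponent
lemma fold_inv (l : List Int) :
    ∀ (mn : Int), List.Pairwise (· < ·) (mn :: l) →
      (l.foldl aStep (mn, countExponentOf2 mn)).2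
          = countExponentOf2 (l.foldl aStep (mn, countExponentOf2 mn)).1 ∧
      (l.foldl aStep (mn, countExponentOf2 mn)).1 ∈ mn :: l ∧
      (∀ i ∈ mn :: l, countExponentOf2 i ≤ (l.foldl aStep (mn, countExponentOf2 mn)).2) ∧
      (∀ i ∈ mn :: l, countExponentOf2 i = (l.foldl aStep (mn, countExponentOf2 mn)).2 →
        (l.foldl aStep (mn, countExponentOf2 mn)).1 ≤ i) := by
  induction l with
  | nil =>
    intro mn _
    refine ⟨rfl, by simp, ?_, ?_⟩ <;> simp
  | cons i l ih =>
    intro mn hpw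
    have hmi : mn < i := (List.pairwise_cons.mp hpw).1 i (by simp)
    have hpw' : List.Pairwise (· < ·) (i :: l) := (List.pairwise_cons.mp hpw).2
    have hpwm : List.Pairwise (· < ·) (mn :: l) := by
      refine List.pairwise_cons.mpr ⟨?_, (List.pairwise_cons.mp hpw').2⟩
      intro x hx
      exact (List.pairwise_cons.mp hpw).1 x (by simp [hx])
    by_cases hc : countExponentOf2 i > countExponentOf2 mn ∨
        (countExponentOf2 i = countExponentOf2 mn ∧ i < mn)
    · have hgt : countExponentOf2 i > countExponentOf2 mn := by
        rcases hc with h | ⟨_, h⟩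
        · exact h
        · omega
      have hstep : List.foldl aStep (mn, countExponentOf2 mn) (i :: l)
          = List.foldl aStep (i, countExponentOf2 i) l := by
        simp only [List.foldl_cons, aStep]
        rw [if_pos hc]
      rw [hstep]
      obtain ⟨h1, h2, h3, h4⟩ := ih i hpw'
      refine ⟨h1, ?_, ?_, ?_⟩
      · rcases List.mem_cons.mp h2 with h | h
        · simp [h]
        · simp [h]
      · intro j hj
        rcases List.mem_cons.mp hj with rfl | hj
        · have := h3 i (by simp)
          omega
        · exact h3 j hj
      · intro j hj hje
        rcases List.mem_cons.mp hj with rfl | hj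
        · exfalso
          have := h3 i (by simp)
          omega
        · exact h4 j hj hje
    · have hstep : List.foldl aStep (mn, countExponentOf2 mn) (i :: l)
          = List.foldl aStep (mn, countExponentOf2 mn) l := by
        simp only [List.foldl_cons, aStep]
        rw [if_neg hc]
      rw [hstep]
      obtain ⟨h1, h2, h3, h4⟩ := ih mn hpwm
      have hle : countExponentOf2 i ≤ countExponentOf2 mn := by
        by_contra h
        exact hc (Or.inl (by omega))
      have hmnle : countExponentOf2 mn ≤ (l.foldl aStep (mn, countExponentOf2 mn)).2 :=
        h3 mn (by simp)
      refine ⟨h1, ?_, ?_, ?_⟩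
      · rcases List.mem_cons.mp h2 with h | h
        · simp [h]
        · simp [h]
      · intro j hj
        rcases List.mem_cons.mp hj with rfl | hj
        · exact hmnle
        · rcases List.mem_cons.mp hj with rfl | hj
          · omega
          · exact h3 j (by simp [hj])
      · intro j hj hje
        rcases List.mem_cons.mp hj with rfl | hj
        · exact h4 j (by simp) hje
        · rcases List.mem_cons.mp hj with rfl | hj
          · have hmn2 : countExponentOf2 mn = (l.foldl aStep (mn, countExponentOf2 mn)).2 := by
              omega
            have := h4 mn (by simp) hmn2
            omega
          · exact h4 j (by simp [hj]) hje

lemma pyRange_nil {a b : Int} (h : b ≤ a) : PySem.List.pyRange a b 1 = [] := by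
  apply List.eq_nil_iff_forall_not_mem.mpr
  intro x hx
  have := PySem.List.mem_pyRange_one.mp hx
  omega

lemma pyRange_pairwise (a b : Int) : List.Pairwise (· < ·) (PySem.List.pyRange a b 1) := by
  by_cases hab : a ≤ b
  · obtain ⟨n, hn⟩ : ∃ n : Nat, b = a + n := ⟨(b - a).toNat, by omega⟩
    subst hn
    clear hab
    induction n generalizing a with
    | zero =>
      rw [pyRange_nil (by simp)]
      exact List.Pairwise.nil
    | succ n ihn =>
      rw [show a + ((n + 1 : Nat) : Int) = (a + 1) + (n : Int) by push_cast; ring]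
      rw [PySem.List.pyRange_one_cons (by omega)]
      refine List.pairwise_cons.mpr ⟨?_, ihn (a + 1)⟩
      intro x hx
      have := PySem.List.mem_pyRange_one.mp hx
      omega
  · rw [pyRange_nil (by omega)]
    exact List.Pairwise.nil

lemma bDescend_zero (a b : Int) :
    bDescend a b 0 = if ceilMul a 0 ≤ b then ceilMul a 0 else a := by
  simp only [bDescend, Int.shiftLeft_eq, pow_zero, one_mul, ceilMul]

lemma bDescend_succ (a b : Int) (k : Nat) :
    bDescend a b (k + 1)
      = if ceilMul a (k + 1) ≤ b then ceilMul a (k + 1) else bDescend a b k := by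
  simp only [bDescend, Int.shiftLeft_eq, one_mul, ceilMul]

lemma bDescend_eq (a b : Int) (E : Nat) (hTE : ceilMul a E ≤ b) :
    ∀ k, E ≤ k → (∀ e, E < e → e ≤ k → ¬ ceilMul a e ≤ b) → bDescend a b k = ceilMul a E := by
  intro k
  induction k with
  | zero =>
    intro hEk _
    have hE0 : E = 0 := by omega
    subst hE0
    rw [bDescend_zero, if_pos hTE]
  | succ k ihk =>
    intro hEk hfail
    rw [bDescend_succ]
    by_cases hEeq : E = k + 1
    · subst hEeq
      rw [if_pos hTE]
    · have hfk : ¬ ceilMul a (k + 1) ≤ b := hfail (k + 1) (by omega) (le_refl _)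
      rw [if_neg hfk]
      exact ihk (by omega) (fun e he hek => hfail e he (by omega))

lemma bDescend_empty (a b : Int) (h : b < a) : ∀ k, bDescend a b k = a := by
  intro k
  induction k with
  | zero =>
    rw [bDescend_zero, if_neg]
    have := (ceilMul_spec a 0).1
    omega
  | succ k ihk =>
    rw [bDescend_succ, if_neg, ihk]
    have := (ceilMul_spec a (k + 1)).1
    omega

lemma ceilMul_zero (a : Int) : ceilMul a 0 = a := by
  simp [ceilMul, PySem.Int.floordiv]

lemma T_mono {a b : Int} {e' e : Nat} (h : e' ≤ e) (hT : ceilMul a e ≤ b) :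
    ceilMul a e' ≤ b := by
  have hd : (2 ^ e' : Int) ∣ ceilMul a e :=
    dvd_trans (pow_dvd_pow 2 h) (ceilMul_spec a e).2
  exact le_trans (ceilMul_le hd (ceilMul_spec a e).1) hT

-- ===== VERDICT (by name: the statement is the Claim_ definition above) =====
theorem MaxExponents_spec : Claim_equal_MaxExponents := by
  intro a b _ hpre
  show MaxExponents a b = MaxExponents_alt a b
  have hpre' : 0 < a ∨ (a < 0 ∧ b < 0) := hpre
  set limit := PySem.Int.bitLength (max (a.natAbs : Int) (b.natAbs : Int)) with hlim
  have halt : MaxExponents_alt a b = bDescend a b limit := rfl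
  by_cases hab : a ≤ b
  · -- nonempty range
    have hz : ∀ m : Int, a ≤ m → m ≤ b → m ≠ 0 := by
      intro m h1 h2; omega
    have hT0 : ceilMul a 0 ≤ b := by rw [ceilMul_zero]; exact hab
    have hTlim : ¬ ceilMul a limit ≤ b := by
      intro hT
      set M0 := ceilMul a limit with hM0
      have haM0 : a ≤ M0 := (ceilMul_spec a limit).1
      have hdM0 : (2 ^ limit : Int) ∣ M0 := (ceilMul_spec a limit).2
      have hne : M0 ≠ 0 := hz M0 haM0 hT
      have hdn : (2 : Nat) ^ limit ∣ M0.natAbs := by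
        have := Int.natAbs_dvd_natAbs.mpr hdM0
        simpa using this
      have hge : 2 ^ limit ≤ M0.natAbs :=
        Nat.le_of_dvd (by omega) hdn
      have hmax : (max (a.natAbs : Int) (b.natAbs : Int)) = ((max a.natAbs b.natAbs : Nat) : Int) := by
        push_cast; rfl
      have hlt : max a.natAbs b.natAbs < 2 ^ limit := by
        have h := PySem.Int.lt_two_pow_bitLength (max (a.natAbs : Int) (b.natAbs : Int))
        rw [hmax] at h
        rw [Int.natAbs_natCast] at h
        rw [hlim, hmax]
        exact h
      rcases hpre' with hp | ⟨hp1, hp2⟩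
      · have : M0.natAbs ≤ b.natAbs := by omega
        omega
      · have : M0.natAbs ≤ a.natAbs := by omega
        omega
    set E := Nat.findGreatest (fun e => ceilMul a e ≤ b) limit with hE
    have hTE : ceilMul a E ≤ b := by
      have := Nat.findGreatest_spec (P := fun e => ceilMul a e ≤ b) (Nat.zero_le limit) hT0
      simpa [hE] using this
    have hgr : ∀ e, E < e → ¬ ceilMul a e ≤ b := by
      intro e he hTe
      by_cases hel : e ≤ limit
      · exact Nat.findGreatest_is_greatest he hel hTe
      · exact hTlim (T_mono (by omega) hTe)
    have halt2 : MaxExponents_alt a b = ceilMul a E := by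
      rw [halt]
      exact bDescend_eq a b E hTE limit (Nat.findGreatest_le limit)
        (fun e hEe _ => hgr e hEe)
    set M := ceilMul a E with hM
    have haM : a ≤ M := (ceilMul_spec a E).1
    have hMb : M ≤ b := hTE
    have hdM : (2 ^ E : Int) ∣ M := (ceilMul_spec a E).2
    have hMne : M ≠ 0 := hz M haM hMb
    have hceM : countExponentOf2 M = (E : Int) := by
      have h1 : (E : Int) ≤ countExponentOf2 M := (countExponentOf2_dvd hMne E).mpr hdM
      have h2 : ¬ ((E + 1 : Nat) : Int) ≤ countExponentOf2 M := by
        intro hle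
        have hdvd := (countExponentOf2_dvd hMne (E + 1)).mp hle
        exact hgr (E + 1) (by omega) (le_trans (ceilMul_le hdvd haM) hMb)
      push_cast at h2 ⊢
      omega
    have hub : ∀ i : Int, a ≤ i → i ≤ b → countExponentOf2 i ≤ (E : Int) := by
      intro i h1 h2
      by_contra hcon
      have hle : ((E + 1 : Nat) : Int) ≤ countExponentOf2 i := by push_cast; omega
      have hdvd := (countExponentOf2_dvd (hz i h1 h2) (E + 1)).mp hle
      exact hgr (E + 1) (by omega) (le_trans (ceilMul_le hdvd h1) h2)
    have hmin : ∀ i : Int, a ≤ i → i ≤ b → countExponentOf2 i = (E : Int) → M ≤ i := by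
      intro i h1 h2 he
      have hdvd := (countExponentOf2_dvd (hz i h1 h2) E).mp (le_of_eq he.symm)
      exact ceilMul_le hdvd h1
    -- A's side
    have hpwl : List.Pairwise (· < ·) (a :: PySem.List.pyRange (a + 1) (b + 1) 1) := by
      refine List.pairwise_cons.mpr ⟨?_, pyRange_pairwise (a + 1) (b + 1)⟩
      intro x hx
      have := PySem.List.mem_pyRange_one.mp hx
      omega
    obtain ⟨h1, h2, h3, h4⟩ := fold_inv (PySem.List.pyRange (a + 1) (b + 1) 1) a hpwl
    have hbounds : ∀ i : Int, i ∈ a :: PySem.List.pyRange (a + 1) (b + 1) 1 → a ≤ i ∧ i ≤ b := by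
      intro i hi
      rcases List.mem_cons.mp hi with rfl | hi
      · exact ⟨le_refl _, hab⟩
      · have := PySem.List.mem_pyRange_one.mp hi
        omega
    have hMmem : M ∈ a :: PySem.List.pyRange (a + 1) (b + 1) 1 := by
      rcases eq_or_lt_of_le haM with heq | hlt
      · exact heq ▸ List.mem_cons_self
      · exact List.mem_cons.mpr (Or.inr (PySem.List.mem_pyRange_one.mpr (by omega)))
    set r := (PySem.List.pyRange (a + 1) (b + 1) 1).foldl aStep (a, countExponentOf2 a) with hr
    have hr1b := hbounds r.1 h2
    have hEr : (E : Int) ≤ r.2 := by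
      have := h3 M hMmem
      omega
    have hrE : r.2 ≤ (E : Int) := by
      rw [h1]
      exact hub r.1 hr1b.1 hr1b.2
    have hr2E : r.2 = (E : Int) := le_antisymm hrE hEr
    have hMr : M ≤ r.1 := hmin r.1 hr1b.1 hr1b.2 (by rw [← h1, hr2E])
    have hrM : r.1 ≤ M := h4 M hMmem (by rw [hceM, hr2E])
    rw [MaxExponents_eq_fold, halt2, ← hr]
    omega
  · -- empty range: A folds over [], B's descent never finds a multiple ≤ b
    rw [MaxExponents_eq_fold, pyRange_nil (by omega), halt, bDescend_empty a b (by omega) limit]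
    rfl
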